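-- pv_equiv track=rewrite | github.com/smm-h/rlsbl | rlsbl/targets/docs/markdown.py | _render_api_index
-- ===== SOURCE A (Python) =====
-- def _render_api_index(modules, project_name, version):
--     """Render the API reference index listing all modules grouped by package."""
--     lines = []
--     lines.append(f"# {project_name} API Reference")
--     lines.append("")
--     lines.append(f"Version: {version}")
--     lines.append("")
--
--     if not modules:
--         lines.append("No documented modules found.")
--         lines.append("")
--         return "\n".join(lines)
--
--     # Group modules by top-level package
--     groups = _group_by_package(modules)
--
--     for package, pages in sorted(groups.items()):
--         lines.append(f"## {package}")
--         lines.append("")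
--         for page in pages:
--             link = f"{page['module']}.md"
--             # Brief description: first line of module docstring or empty
--             brief = _first_line(page.get("docstring", ""))
--             if brief:
--                 lines.append(f"- [{page['module']}]({link}) -- {brief}")
--             else:
--                 lines.append(f"- [{page['module']}]({link})")
--         lines.append("")
--
--     return "\n".join(lines)
--
-- def _group_by_package(modules):
--     """Group modules by their top-level package name.
--
--     e.g., "rlsbl.commands.release" goes into the "rlsbl" group.
--     Modules with no dots go into a group named after themselves.
--     """
--     groups = {}
--     for page in modules:
--         module_name = page["module"]
--         parts = module_name.split(".")
--         # Use the first component as the group key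
--         package = parts[0]
--         groups.setdefault(package, []).append(page)
--     return groups
--
-- def _first_line(text):
--     """Extract the first non-empty line from a string."""
--     if not text:
--         return ""
--     for line in text.splitlines():
--         stripped = line.strip()
--         if stripped:
--             return stripped
--     return ""
-- ===== SOURCE B (Python) =====
-- def _render_api_index(modules, project_name, version):
--     """Render the API reference index, without a dict of lists: collect the set of
--     top-level package names, sort it, and for each package scan the modules list."""
--     lines = []
--     lines.append(f"# {project_name} API Reference")
--     lines.append("")
--     lines.append(f"Version: {version}")
--     lines.append("")
--
--     if not modules:
--         lines.append("No documented modules found.")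
--         lines.append("")
--         return "\n".join(lines)
--
--     packages = sorted({page["module"].split(".")[0] for page in modules})
--
--     for package in packages:
--         lines.append(f"## {package}")
--         lines.append("")
--         for page in modules:
--             if page["module"].split(".")[0] != package:
--                 continue
--             link = f"{page['module']}.md"
--             brief = _first_line(page.get("docstring", ""))
--             if brief:
--                 lines.append(f"- [{page['module']}]({link}) -- {brief}")
--             else:
--                 lines.append(f"- [{page['module']}]({link})")
--         lines.append("")
--
--     return "\n".join(lines)
--
--
-- def _first_line(text):
--     """Extract the first non-empty line from a string."""
--     if not text:
--         return ""
--     for line in text.splitlines():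
--         stripped = line.strip()
--         if stripped:
--             return stripped
--     return ""
-- ===== Notes on version B (the rewrite author's own statement) =====
-- stated objective: alternative
-- what changed: Replaces the dict-of-lists grouping plus sorted(items) with a sorted set of top-level package names and one filtering scan of the modules list per package; no groups dict is ever built.
import Mathlib
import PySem

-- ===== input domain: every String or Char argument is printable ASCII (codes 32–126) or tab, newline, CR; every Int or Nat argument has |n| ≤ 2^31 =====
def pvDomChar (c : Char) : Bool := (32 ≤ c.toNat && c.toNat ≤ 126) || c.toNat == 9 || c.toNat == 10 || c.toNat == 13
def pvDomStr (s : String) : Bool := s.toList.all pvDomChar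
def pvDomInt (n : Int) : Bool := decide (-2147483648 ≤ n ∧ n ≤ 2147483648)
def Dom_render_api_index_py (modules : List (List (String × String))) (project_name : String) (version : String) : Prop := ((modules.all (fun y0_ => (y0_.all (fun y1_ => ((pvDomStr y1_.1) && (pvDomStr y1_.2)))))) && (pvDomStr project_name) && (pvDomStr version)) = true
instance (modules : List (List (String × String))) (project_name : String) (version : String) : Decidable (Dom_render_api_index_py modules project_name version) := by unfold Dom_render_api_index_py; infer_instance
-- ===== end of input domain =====

-- B replaces A's dict-of-lists grouping + sorted(items) by a sorted set of package
-- names with one filtering scan of the modules list per package (alternative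
-- decomposition, similar cost). Equivalence of the RETURN value is proved on Pre_.

-- ===== PORT A =====

-- page["module"]; Pre_ guarantees the key is present (Python raises KeyError otherwise)
def pvModuleOf (page : List (String × String)) : String :=
  ((PySem.Dict.mk page).get? "module").getD ""

-- page["module"].split(".")[0] — split?'s none is only for sep = "", and split never returns [], so [0] is the head
def pvPkgOf (page : List (String × String)) : String :=
  ((PySem.Str.split? (pvModuleOf page) ".").getD []).headD ""

-- _first_line's loop over text.splitlines()
def pvFirstLineAux : List String → String
  | [] => ""
  | l :: rest =>
      let stripped := PySem.Str.strip l
      if stripped ≠ "" then stripped else pvFirstLineAux rest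

-- _first_line (identical helper in both Pythons)
def pvFirstLine (text : String) : String :=
  if text == "" then "" else pvFirstLineAux (PySem.Str.splitlines text)

-- the bullet line for one page (identical formatting code in both Pythons)
def pvBulletOf (page : List (String × String)) : String :=
  let link := pvModuleOf page ++ ".md"
  let brief := pvFirstLine ((PySem.Dict.mk page).getD "docstring" "")
  if brief ≠ "" then "- [" ++ pvModuleOf page ++ "](" ++ link ++ ") -- " ++ brief
  else "- [" ++ pvModuleOf page ++ "](" ++ link ++ ")"

-- _group_by_package: groups.setdefault(package, []).append(page) is d[package] = d.get(package, []) + [page]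
def pvGroupByPackage (modules : List (List (String × String))) : PySem.Dict String (List (List (String × String))) :=
  modules.foldl (fun groups page => groups.modify (pvPkgOf page) [] (· ++ [page])) PySem.Dict.empty

def render_api_index_py (modules : List (List (String × String))) (project_name : String) (version : String) : String :=
  let lines := ["# " ++ project_name ++ " API Reference", "", "Version: " ++ version, ""]
  if modules.isEmpty then
    PySem.Str.join "\n" (lines ++ ["No documented modules found.", ""])
  else
    let groups := pvGroupByPackage modules
    -- sorted(groups.items()): the keys are distinct, so Python orders by the key alone
    let lines := (PySem.List.sorted groups.items (fun pr => pr.1) false).foldl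
      (fun lines pr => lines ++ ["## " ++ pr.1, ""] ++ pr.2.map pvBulletOf ++ [""]) lines
    PySem.Str.join "\n" lines

-- ===== PORT B =====
def render_api_index_py_alt (modules : List (List (String × String))) (project_name : String) (version : String) : String :=
  let lines := ["# " ++ project_name ++ " API Reference", "", "Version: " ++ version, ""]
  if modules.isEmpty then
    PySem.Str.join "\n" (lines ++ ["No documented modules found.", ""])
  else
    let packages := PySem.List.sorted (PySem.Set.ofList (modules.map pvPkgOf)) (fun x => x) false
    let lines := packages.foldl
      (fun lines p =>
        lines ++ ["## " ++ p, ""]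
          ++ (modules.filter (fun page => pvPkgOf page == p)).map pvBulletOf ++ [""]) lines
    PySem.Str.join "\n" lines

-- ===== PRECONDITION & SPEC =====
-- Pre_ excludes exactly the pages without a "module" key, on which Python A (and B) raise KeyError.
def Pre_render_api_index_py (modules : List (List (String × String))) (project_name : String) (version : String) : Prop :=
  ∀ page ∈ modules, "module" ∈ page.map Prod.fst
instance (modules : List (List (String × String))) (project_name : String) (version : String) : Decidable (Pre_render_api_index_py modules project_name version) := by unfold Pre_render_api_index_py; infer_instance

def pvWitness_render_api_index_py : (List (List (String × String))) × String × String :=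
  ([[("module", "pkg.mod"), ("docstring", " Brief. ")], [("module", "solo")]], "Proj", "1.0")

def Spec_render_api_index_py (modules : List (List (String × String))) (project_name : String) (version : String) (out : String) : Prop := out = render_api_index_py_alt modules project_name version
instance (modules : List (List (String × String))) (project_name : String) (version : String) (out : String) : Decidable (Spec_render_api_index_py modules project_name version out) := by unfold Spec_render_api_index_py; infer_instance

-- ===== CLAIM (what is proved, stated in full; the proofs are below) =====
def Claim_equal_render_api_index_py : Prop := ∀ (modules : List (List (String × String))) (project_name : String) (version : String), Dom_render_api_index_py modules project_name version → Pre_render_api_index_py modules project_name version → Spec_render_api_index_py modules project_name version (render_api_index_py modules project_name version)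

-- ===== LEMMAS AND PROOFS =====

-- A's groups dict: its keys are the distinct packages in first-occurrence order
lemma pvGroup_keys (modules : List (List (String × String))) :
    (pvGroupByPackage modules).keys = PySem.Set.ofList (modules.map pvPkgOf) := by
  unfold pvGroupByPackage
  rw [PySem.Dict.keys_foldl_modify_key]
  simp [PySem.Dict.keys_empty, PySem.Set.update_nil_left]

-- A's groups dict: each package maps to the filtered sublist of modules, in input order
lemma pvGroup_getD (modules : List (List (String × String))) (p : String) :
    (pvGroupByPackage modules).getD p []
      = modules.filter (fun page => pvPkgOf page == p) := by
  unfold pvGroupByPackage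
  have h := PySem.Dict.getD_foldl_modify_append
    (l := modules.map (fun page => (pvPkgOf page, page)))
    (d := (PySem.Dict.empty : PySem.Dict String (List (List (String × String))))) (c := p)
  rw [List.foldl_map] at h
  simp only [PySem.Dict.getD_empty, List.nil_append, List.filter_map] at h
  simpa [show ((fun (x : String × List (String × String)) => x.2) ∘
      fun page => (pvPkgOf page, page)) = id from rfl] using h

-- sorted(groups.items()) IS the sorted package list paired with the filtered sublists
lemma pvItems_sorted_eq (modules : List (List (String × String))) :
    PySem.List.sorted (pvGroupByPackage modules).items (fun pr => pr.1) false
      = (PySem.List.sorted (PySem.Set.ofList (modules.map pvPkgOf)) (fun x => x) false).map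
          (fun p => (p, modules.filter (fun page => pvPkgOf page == p))) := by
  have hnd : (pvGroupByPackage modules).keys.Nodup := by
    rw [pvGroup_keys]; exact PySem.Set.nodup_ofList _
  have hitems : (pvGroupByPackage modules).items
      = (PySem.Set.ofList (modules.map pvPkgOf)).map
          (fun p => (p, modules.filter (fun page => pvPkgOf page == p))) := by
    rw [PySem.Dict.items_eq_map_keys _ hnd ([] : List (List (String × String))), pvGroup_keys]
    exact List.map_congr_left (fun p _ => by rw [pvGroup_getD])
  rw [hitems]
  apply PySem.List.sorted_eq_of_perm_of_pairwise_lt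
  · exact ((PySem.List.sorted_perm _ _ _).map _)
  · exact List.pairwise_map.mpr
      (by simpa using PySem.List.sorted_ofList_pairwise_lt (modules.map pvPkgOf))

-- ===== VERDICT (by name: the statement is the Claim_ definition above) =====
theorem render_api_index_py_spec : Claim_equal_render_api_index_py := by
  intro modules project_name version _ _
  unfold Spec_render_api_index_py render_api_index_py render_api_index_py_alt
  by_cases h : modules.isEmpty
  · simp [h]
  · simp only [h, pvItems_sorted_eq, List.foldl_map]
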